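-- pv_equiv track=rewrite | github.com/or-yanko/Python-Projects | python servers/tcp multy clients trivia/chatlib.py | split_data
-- ===== SOURCE A (Python) =====
-- def split_data(msg, expected_fields):
-- 	"""Helper method. gets a string and number of expected fields in it. Splits the string
-- 	using protocol's data field delimiter (|#) and validates that there are correct number of fields.
-- 	Returns: list of fields if all ok. If some error occured, returns None
-- 	"""
-- 	count=0
-- 	data_list = list(msg)
-- 	for ch in data_list:
-- 		if ch == '#':
-- 			count+=1
-- 	if count == expected_fields:
-- 		return msg.split('#')
-- 	return [None]
-- ===== SOURCE B (Python) =====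
-- def split_data(msg, expected_fields):
--     parts = msg.split('#')
--     if len(parts) == expected_fields + 1:
--         return parts
--     return [None]
-- ===== Notes on version B (the rewrite author's own statement) =====
-- stated objective: simpler
-- what changed: B splits once and checks the number of resulting parts (len(parts) == expected_fields + 1) instead of first counting '#' characters with an explicit per-character loop and then splitting in a second pass.
import Mathlib
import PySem

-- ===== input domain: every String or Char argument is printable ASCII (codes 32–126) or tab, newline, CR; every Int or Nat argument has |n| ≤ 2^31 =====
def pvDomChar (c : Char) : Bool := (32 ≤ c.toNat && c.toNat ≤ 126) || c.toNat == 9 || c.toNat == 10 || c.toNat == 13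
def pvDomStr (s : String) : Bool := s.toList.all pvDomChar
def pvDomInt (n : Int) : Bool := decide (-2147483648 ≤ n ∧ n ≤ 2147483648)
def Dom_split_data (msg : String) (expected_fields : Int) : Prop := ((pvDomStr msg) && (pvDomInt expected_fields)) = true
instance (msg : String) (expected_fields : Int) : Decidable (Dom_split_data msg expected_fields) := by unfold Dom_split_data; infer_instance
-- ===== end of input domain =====

-- B splits once and compares the number of parts with expected_fields + 1, instead of A's
-- count-'#'-then-split two-pass structure (objective: simpler).


-- ===== PORT A =====
-- count=0; for ch in list(msg): if ch == '#': count += 1; then split on a match.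
def split_data (msg : String) (expected_fields : Int) : List (Option String) :=
  let data_list := msg.toList
  let count : Int := data_list.foldl (fun count ch => if ch == '#' then count + 1 else count) 0
  if count = expected_fields then
    ((PySem.Chars.splitOn msg.toList ['#']).map String.ofList).map some   -- msg.split('#')
  else [none]

-- ===== PORT B =====
-- parts = msg.split('#'); return parts if len(parts) == expected_fields + 1 else [None]
def split_data_alt (msg : String) (expected_fields : Int) : List (Option String) :=
  let parts := (PySem.Chars.splitOn msg.toList ['#']).map String.ofList
  if (parts.length : Int) = expected_fields + 1 then parts.map some else [none]

-- ===== PRECONDITION & SPEC =====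
def Spec_split_data (msg : String) (expected_fields : Int) (out : List (Option String)) : Prop := out = split_data_alt msg expected_fields
instance (msg : String) (expected_fields : Int) (out : List (Option String)) : Decidable (Spec_split_data msg expected_fields out) := by unfold Spec_split_data; infer_instance

-- ===== CLAIM (what is proved, stated in full; the proofs are below) =====
def Claim_equal_split_data : Prop := ∀ (msg : String) (expected_fields : Int), Dom_split_data msg expected_fields → Spec_split_data msg expected_fields (split_data msg expected_fields)

-- ===== LEMMAS AND PROOFS =====

-- A's counting loop computes the number of '#' characters.
theorem foldl_count_hash (l : List Char) (n : Int) :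
    l.foldl (fun count ch => if ch == '#' then count + 1 else count) n = n + l.count '#' := by
  induction l generalizing n with
  | nil => simp
  | cons c rest ih =>
    rw [List.foldl_cons]
    by_cases h : c = '#'
    · rw [if_pos (by simp [h]), ih, List.count_cons, if_pos (by simp [h])]
      push_cast; ring
    · rw [if_neg (by simp [h]), ih, List.count_cons, if_neg (by simp [h])]; simp

-- splitOn's fuel loop produces one part per '#', plus one.
theorem splitOn_go_length (fuel : Nat) (l cur : List Char) (acc : List (List Char))
    (h : l.length ≤ fuel) :
    (PySem.Chars.splitOn.go ['#'] fuel l cur acc).length = acc.length + l.count '#' + 1 := by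
  induction fuel generalizing l cur acc with
  | zero =>
    have : l = [] := List.length_eq_zero_iff.mp (Nat.le_zero.mp h)
    subst this
    simp [PySem.Chars.splitOn.go]
  | succ fuel ih =>
    cases l with
    | nil => simp [PySem.Chars.splitOn.go]
    | cons c rest =>
      by_cases hc : c = '#'
      · subst hc
        simp only [PySem.Chars.splitOn.go, List.isPrefixOf, List.cons.injEq]
        rw [if_pos (by simp [List.isPrefixOf])]
        simp only [List.length_cons] at h
        rw [show List.drop (['#'].length) ('#' :: rest) = rest by simp]
        rw [ih rest [] (cur.reverse :: acc) (by omega)]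
        simp
        omega
      · simp only [PySem.Chars.splitOn.go]
        rw [if_neg (by simp [List.isPrefixOf]; exact fun h' => hc h'.symm)]
        simp only [List.length_cons] at h
        rw [ih rest (c :: cur) acc (by omega)]
        simp [hc]

theorem splitOn_length (s : List Char) :
    (PySem.Chars.splitOn s ['#']).length = s.count '#' + 1 := by
  unfold PySem.Chars.splitOn
  rw [splitOn_go_length _ _ _ _ (by omega)]
  simp

-- ===== VERDICT (by name: the statement is the Claim_ definition above) =====
theorem split_data_spec : Claim_equal_split_data := by
  intro msg expected_fields _
  unfold Spec_split_data split_data split_data_alt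
  simp only [List.length_map, splitOn_length, foldl_count_hash, zero_add]
  by_cases h : (msg.toList.count '#' : Int) = expected_fields
  · rw [if_pos h, if_pos (by push_cast; omega)]
  · rw [if_neg h, if_neg (by push_cast; omega)]
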